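-- pv_equiv track=rewrite | github.com/77JY/study-python | LEVEL1/둘만의 암호/python.py | solution
-- ===== SOURCE A (Python) =====
-- def solution(s, skip, index):
--     dic = {}
--     for i in skip:
--         dic[ord(i)] = 1
--     answer = ""
--     for i in range(len(s)):
--         wd = ord(s[i])
--         for j in range(index):
--             wd += 1
--             if 122 < wd:
--                 wd -= 26
--             while dic.get(wd):
--                 wd += 1
--                 if 122 < wd:
--                     wd -= 26
--         answer += chr(wd)
--     return(answer)
-- ===== SOURCE B (Python) =====
-- def solution(s, skip, index):
--     if index <= 0:
--         return s
--     banned = {ord(c) for c in skip}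
--     # allowed codes in the wrap-around band [97, 122] (the cycle A ends up in)
--     cycle = [c for c in range(97, 123) if c not in banned]
--     out = []
--     for ch in s:
--         w = ord(ch)
--         if w > 122:
--             w -= 26
--         # allowed codes strictly after w, up to 122: the transient part of A's walk
--         prefix = [c for c in range(w + 1, 123) if c not in banned]
--         if index <= len(prefix):
--             out.append(chr(prefix[index - 1]))
--         else:
--             out.append(chr(cycle[(index - 1 - len(prefix)) % len(cycle)]))
--     return "".join(out)
-- ===== Notes on version B (the rewrite author's own statement) =====
-- stated objective: faster
-- what changed: B replaces A's per-character loop of `index` single shift-and-skip steps by a closed form: the k-th value is read directly from the list of allowed codes after the character (the transient prefix) or, past it, from the allowed lowercase cycle at position (index-1-len(prefix)) mod len(cycle).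
import Mathlib
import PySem

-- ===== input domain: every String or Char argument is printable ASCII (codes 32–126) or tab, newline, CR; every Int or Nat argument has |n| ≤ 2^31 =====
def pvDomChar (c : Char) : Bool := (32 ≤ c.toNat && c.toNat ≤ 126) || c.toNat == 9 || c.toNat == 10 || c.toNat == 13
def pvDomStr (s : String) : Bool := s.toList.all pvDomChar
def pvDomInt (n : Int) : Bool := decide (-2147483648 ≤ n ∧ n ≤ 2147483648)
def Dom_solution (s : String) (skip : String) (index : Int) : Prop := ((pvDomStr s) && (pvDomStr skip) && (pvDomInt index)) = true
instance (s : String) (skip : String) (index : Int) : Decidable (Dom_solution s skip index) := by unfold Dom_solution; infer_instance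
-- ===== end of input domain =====

-- B replaces A's per-character loop of `index` shift-and-skip steps by a closed form over
-- the allowed codes after the character and the allowed lowercase cycle (objective: faster).
-- A's `while` is a fuel-bounded transcription (fuel 200 suffices on every input admitted by Pre_).

-- ===== PORT A =====
def pvTruthy (o : Option Int) : Bool :=
  match o with
  | some v => v != 0
  | none => false

-- `while dic.get(wd): wd += 1; if 122 < wd: wd -= 26` (fuel-bounded transcription)
def pvSkipA (dic : PySem.Dict Int Int) : Nat → Int → Int
  | 0, wd => wd
  | n + 1, wd =>
    if pvTruthy (dic.get? wd) then
      let wd := wd + 1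
      let wd := if 122 < wd then wd - 26 else wd
      pvSkipA dic n wd
    else wd

-- one iteration of the body of A's `for j in range(index)`
def pvStepA (dic : PySem.Dict Int Int) (wd : Int) : Int :=
  let wd := wd + 1
  let wd := if 122 < wd then wd - 26 else wd
  pvSkipA dic 200 wd

-- `for j in range(index): …`
def pvLoopA (dic : PySem.Dict Int Int) : Nat → Int → Int
  | 0, wd => wd
  | n + 1, wd => pvLoopA dic n (pvStepA dic wd)

def solution (s : String) (skip : String) (index : Int) : String :=
  let dic := skip.toList.foldl (fun d i => d.insert ((i.toNat : Int)) 1)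
    (PySem.Dict.empty : PySem.Dict Int Int)
  let answer := s.toList.foldl
    (fun answer c => answer ++ [Char.ofNat (pvLoopA dic index.toNat ((c.toNat : Int))).toNat])
    ([] : List Char)
  String.ofList answer

-- ===== PORT B =====
def solution_alt (s : String) (skip : String) (index : Int) : String :=
  if index ≤ 0 then s
  else
    let banned := PySem.Set.ofList (skip.toList.map (fun c => ((c.toNat : Int))))
    let cycle := (PySem.List.pyRange 97 123 1).filter (fun c => !(PySem.Set.contains banned c))
    String.ofList (s.toList.map (fun ch =>
      let w : Int := ((ch.toNat : Int))
      let w := if 122 < w then w - 26 else w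
      let pre := (PySem.List.pyRange (w + 1) 123 1).filter (fun c => !(PySem.Set.contains banned c))
      if index ≤ (pre.length : Int) then
        Char.ofNat ((PySem.List.pyGet? pre (index - 1)).getD 0).toNat
      else
        Char.ofNat ((PySem.List.pyGet? cycle
          (PySem.Int.mod (index - 1 - (pre.length : Int)) ((cycle.length : Int)))).getD 0).toNat))

-- ===== PRECONDITION & SPEC =====
-- Pre_ excludes exactly the inputs on which A never returns: a positive index, every lowercase
-- letter skipped, and some character of s whose forward scan has fewer than `index` unskipped
-- codes left — there A's while-loop runs forever, so A returns no value at all.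
def Pre_solution (s : String) (skip : String) (index : Int) : Prop :=
  index ≤ 0
  ∨ (∃ n ∈ PySem.List.pyRange 97 123 1, ¬ (skip.toList.map (fun c => ((c.toNat : Int)))).contains n)
  ∨ ∀ c ∈ s.toList, index ≤
      (((PySem.List.pyRange ((if 122 < ((c.toNat : Int)) then ((c.toNat : Int)) - 26 else ((c.toNat : Int))) + 1) 123 1).filter
        (fun n => !((skip.toList.map (fun ch => ((ch.toNat : Int)))).contains n))).length : Int)
instance (s : String) (skip : String) (index : Int) : Decidable (Pre_solution s skip index) := by
  unfold Pre_solution; infer_instance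

def pvWitness_solution : String × String × Int := ("abc xyz!", "bd", 3)

def Spec_solution (s : String) (skip : String) (index : Int) (out : String) : Prop := out = solution_alt s skip index
instance (s : String) (skip : String) (index : Int) (out : String) : Decidable (Spec_solution s skip index out) := by unfold Spec_solution; infer_instance

-- ===== CLAIM =====
def Claim_equal_solution : Prop := ∀ (s : String) (skip : String) (index : Int), Dom_solution s skip index → Pre_solution s skip index → Spec_solution s skip index (solution s skip index)

-- ===== LEMMAS AND PROOFS =====

-- the allowed codes from w (inclusive) up to 122, in increasing order
def pvQ (al : Int → Bool) (w : Int) : List Int := (PySem.List.pyRange w 123 1).filter al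

theorem pvQ_nil (al : Int → Bool) (w : Int) (h : 123 ≤ w) : pvQ al w = [] := by
  unfold pvQ; rw [PySem.List.pyRange_one_eq_nil h]; rfl

theorem pvQ_cons (al : Int → Bool) (w : Int) (h : w < 123) :
    pvQ al w = (if al w then [w] else []) ++ pvQ al (w + 1) := by
  unfold pvQ; rw [PySem.List.pyRange_one_cons h, List.filter_cons]
  split <;> simp

-- structure of a nonempty pvQ: its head is the first allowed code, its tail restarts after it
theorem pvQ_struct_aux (al : Int → Bool) :
    ∀ (n : Nat) (a q : Int) (rest : List Int), (123 - a).toNat ≤ n →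
      pvQ al a = q :: rest → a ≤ q ∧ q < 123 ∧ al q = true ∧ rest = pvQ al (q + 1) := by
  intro n
  induction n with
  | zero =>
    intro a q rest hn h
    rw [pvQ_nil al a (by omega)] at h
    exact absurd h (by simp)
  | succ n ih =>
    intro a q rest hn h
    by_cases ha : 123 ≤ a
    · rw [pvQ_nil al a ha] at h; exact absurd h (by simp)
    · rw [pvQ_cons al a (by omega)] at h
      by_cases hal : al a = true
      · rw [if_pos hal] at h
        simp only [List.cons_append, List.nil_append, List.cons.injEq] at h
        obtain ⟨h1, h2⟩ := h
        subst h1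
        exact ⟨le_refl _, by omega, hal, h2.symm⟩
      · rw [if_neg hal, List.nil_append] at h
        obtain ⟨h1, h2, h3, h4⟩ := ih (a + 1) q rest (by omega) h
        exact ⟨by omega, h2, h3, h4⟩

theorem pvQ_struct (al : Int → Bool) (a q : Int) (rest : List Int)
    (h : pvQ al a = q :: rest) : a ≤ q ∧ q < 123 ∧ al q = true ∧ rest = pvQ al (q + 1) :=
  pvQ_struct_aux al (123 - a).toNat a q rest (le_refl _) h

-- the scan (A's while-loop) stops at the first allowed code ≥ w, if there is one before 123
theorem scan_first (dic : PySem.Dict Int Int) (al : Int → Bool)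
    (hmem : ∀ v, pvTruthy (dic.get? v) = !(al v)) :
    ∀ (n : Nat) (w q : Int) (rest : List Int), w ≤ 122 → (123 - w).toNat ≤ n →
      pvQ al w = q :: rest → pvSkipA dic n w = q := by
  intro n
  induction n with
  | zero => intro w q rest hw hn _; omega
  | succ n ih =>
    intro w q rest hw hn h
    rw [pvSkipA, hmem w]
    by_cases hal : al w = true
    · rw [hal]
      simp only [Bool.not_true, Bool.false_eq_true, if_false]
      rw [pvQ_cons al w (by omega), if_pos hal] at h
      simp only [List.cons_append, List.cons.injEq] at h
      exact h.1
    · rw [Bool.not_eq_true] at hal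
      rw [hal]
      simp only [Bool.not_false, if_true]
      rw [pvQ_cons al w (by omega), if_neg (by simp [hal]), List.nil_append] at h
      by_cases hw122 : w = 122
      · subst hw122
        rw [pvQ_nil al (122 + 1) (by omega)] at h
        exact absurd h (by simp)
      · have hwrap : ¬ (122 < w + 1) := by omega
        rw [if_neg hwrap]
        exact ih (w + 1) q rest (by omega) (by omega) h

-- if no allowed code remains before 123, the scan wraps and stops at the first allowed lowercase
theorem scan_cycle (dic : PySem.Dict Int Int) (al : Int → Bool)
    (hmem : ∀ v, pvTruthy (dic.get? v) = !(al v)) (c0 : Int) (crest : List Int)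
    (hC : pvQ al 97 = c0 :: crest) :
    ∀ (n : Nat) (w : Int), 9 ≤ w → w ≤ 122 → (149 - w).toNat ≤ n →
      pvQ al w = [] → pvSkipA dic n w = c0 := by
  intro n
  induction n with
  | zero => intro w hw9 hw hn _; omega
  | succ n ih =>
    intro w hw9 hw hn hQ
    rw [pvSkipA, hmem w]
    by_cases hal : al w = true
    · exfalso
      rw [pvQ_cons al w (by omega), if_pos hal] at hQ
      exact absurd hQ (by simp)
    · rw [Bool.not_eq_true] at hal
      rw [hal]
      simp only [Bool.not_false, if_true]
      rw [pvQ_cons al w (by omega), if_neg (by simp [hal]), List.nil_append] at hQ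
      by_cases hw122 : w = 122
      · subst hw122
        rw [if_pos (by omega)]
        exact scan_first dic al hmem n 97 c0 crest (by omega) (by omega) hC
      · rw [if_neg (by omega)]
        exact ih (w + 1) (by omega) (by omega) (by omega) hQ

-- A's step from w: first allowed code after w (up to 122)…
theorem stepA_first (dic : PySem.Dict Int Int) (al : Int → Bool)
    (hmem : ∀ v, pvTruthy (dic.get? v) = !(al v)) (w q : Int) (rest : List Int)
    (hw9 : 9 ≤ w) (hw : w ≤ 122) (h : pvQ al (w + 1) = q :: rest) :
    pvStepA dic w = q := by
  by_cases hw122 : w = 122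
  · subst hw122
    rw [pvQ_nil al (122 + 1) (by omega)] at h
    exact absurd h (by simp)
  · unfold pvStepA
    simp only
    rw [if_neg (by omega)]
    exact scan_first dic al hmem 200 (w + 1) q rest (by omega) (by omega) h

-- …or, when none remains, the first allowed lowercase
theorem stepA_cycle (dic : PySem.Dict Int Int) (al : Int → Bool)
    (hmem : ∀ v, pvTruthy (dic.get? v) = !(al v)) (w c0 : Int) (crest : List Int)
    (hw9 : 9 ≤ w) (hw : w ≤ 122) (hQ : pvQ al (w + 1) = [])
    (hC : pvQ al 97 = c0 :: crest) : pvStepA dic w = c0 := by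
  unfold pvStepA
  simp only
  by_cases hw122 : w = 122
  · subst hw122
    rw [if_pos (by omega)]
    norm_num
    exact scan_first dic al hmem 200 97 c0 crest (by omega) (by omega) hC
  · rw [if_neg (by omega)]
    exact scan_cycle dic al hmem c0 crest hC 200 (w + 1) (by omega) (by omega) (by omega) hQ

-- the closed form for A's inner loop: read the k-th value off prefix ++ cycle ++ cycle ++ …
theorem loop_closed (dic : PySem.Dict Int Int) (al : Int → Bool)
    (hmem : ∀ v, pvTruthy (dic.get? v) = !(al v)) :
    ∀ (k : Nat) (w : Int), 9 ≤ w → w ≤ 122 →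
      (k + 1 ≤ (pvQ al (w + 1)).length ∨ pvQ al 97 ≠ []) →
      pvLoopA dic (k + 1) w =
        if k + 1 ≤ (pvQ al (w + 1)).length then (pvQ al (w + 1)).getD k 0
        else (pvQ al 97).getD ((k - (pvQ al (w + 1)).length) % (pvQ al 97).length) 0 := by
  intro k
  induction k with
  | zero =>
    intro w hw9 hw hyp
    show pvStepA dic w = _
    match hQ : pvQ al (w + 1) with
    | q :: rest =>
      rw [stepA_first dic al hmem w q rest hw9 hw hQ]
      simp
    | [] =>
      have hC : pvQ al 97 ≠ [] := by
        rcases hyp with h | h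
        · rw [hQ] at h; simp at h
        · exact h
      match hC2 : pvQ al 97 with
      | [] => exact absurd hC2 hC
      | c0 :: crest =>
        rw [stepA_cycle dic al hmem w c0 crest hw9 hw hQ hC2]
        simp
  | succ k ih =>
    intro w hw9 hw hyp
    show pvLoopA dic (k + 1) (pvStepA dic w) = _
    match hQ : pvQ al (w + 1) with
    | q :: rest =>
      obtain ⟨hq1, hq2, _, hrest⟩ := pvQ_struct al (w + 1) q rest hQ
      rw [stepA_first dic al hmem w q rest hw9 hw hQ]
      have ihq := ih q (by omega) (by omega) (by
        rcases hyp with h | h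
        · left; rw [hQ] at h; rw [← hrest]; simpa using h
        · right; exact h)
      rw [← hrest] at ihq
      rw [ihq]
      have hlen : (q :: rest).length = rest.length + 1 := by simp
      by_cases hle : k + 1 ≤ rest.length
      · rw [if_pos hle, if_pos (by omega)]
        simp [List.getD]
      · rw [if_neg hle, if_neg (by omega)]
        rw [hlen]
        have : k + 1 - (rest.length + 1) = k - rest.length := by omega
        rw [this]
    | [] =>
      have hC : pvQ al 97 ≠ [] := by
        rcases hyp with h | h
        · rw [hQ] at h; simp at h
        · exact h
      match hC2 : pvQ al 97 with
      | [] => exact absurd hC2 hC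
      | c0 :: crest =>
        obtain ⟨hc1, hc2, _, hcrest⟩ := pvQ_struct al 97 c0 crest hC2
        rw [stepA_cycle dic al hmem w c0 crest hw9 hw hQ hC2]
        have ihc := ih c0 (by omega) (by omega) (by right; rw [hC2]; simp)
        rw [← hcrest, hC2] at ihc
        rw [ihc]
        simp only [List.length_nil, List.length_cons, Nat.sub_zero]
        rw [if_neg (by omega : ¬ (k + 1 + 1 ≤ 0))]
        by_cases hle : k + 1 ≤ crest.length
        · rw [if_pos hle, Nat.mod_eq_of_lt (by omega), List.getD_cons_succ]
        · rw [if_neg hle]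
          have h1 : k + 1 = (k - crest.length) + (crest.length + 1) := by omega
          rw [h1, Nat.add_mod_right]

-- A processes chars with `answer += chr(…)`: that fold is a map
theorem foldl_append_map (l : List Char) (f : Char → Char) (acc : List Char) :
    l.foldl (fun a c => a ++ [f c]) acc = acc ++ l.map f := by
  induction l generalizing acc with
  | nil => simp
  | cons c l ih => simp [ih]

-- the dict A builds tests the same membership as the list of skipped codes
theorem truthy_foldl_insert (l : List Int) (d : PySem.Dict Int Int) (w : Int) :
    pvTruthy ((l.foldl (fun d i => d.insert i 1) d).get? w)
      = (pvTruthy (d.get? w) || decide (w ∈ l)) := by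
  induction l generalizing d with
  | nil => simp
  | cons a l ih =>
    simp only [List.foldl_cons, ih, List.mem_cons]
    rw [PySem.Dict.get?_insert]
    by_cases h : w = a
    · subst h; simp [pvTruthy]
    · simp [h]

theorem dom_char_code {c : Char} (h : pvDomChar c = true) :
    9 ≤ ((c.toNat : Int)) ∧ ((c.toNat : Int)) ≤ 126 := by
  simp [pvDomChar] at h
  omega

-- A's first shift wraps codes 123–126 into the lowercase band: looping from w is looping from w - 26
theorem loopA_wrap (dic : PySem.Dict Int Int) (n : Nat) (w : Int)
    (h1 : 123 ≤ w) (h2 : w ≤ 126) :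
    pvLoopA dic (n + 1) w = pvLoopA dic (n + 1) (w - 26) := by
  show pvLoopA dic n (pvStepA dic w) = pvLoopA dic n (pvStepA dic (w - 26))
  congr 1
  unfold pvStepA
  simp only
  rw [if_pos (by omega : (122 : Int) < w + 1), if_neg (by omega : ¬ (122 : Int) < w - 26 + 1)]
  have h : w + 1 - 26 = w - 26 + 1 := by ring
  rw [h]

-- ===== VERDICT =====
theorem solution_spec : Claim_equal_solution := by
  intro s skip index hdom hpre
  unfold Spec_solution solution solution_alt
  simp only
  rw [foldl_append_map, List.nil_append]
  have hdoms : ∀ c ∈ s.toList, pvDomChar c = true := by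
    unfold Dom_solution pvDomStr at hdom
    simp only [Bool.and_eq_true] at hdom
    exact fun c hc => List.all_eq_true.mp hdom.1.1 c hc
  by_cases hle : index ≤ 0
  · rw [if_pos hle]
    have hidx : index.toNat = 0 := Int.toNat_of_nonpos hle
    rw [hidx]
    simp only [pvLoopA, Int.toNat_natCast, Char.ofNat_toNat, List.map_id', String.ofList_toList]
  · rw [if_neg hle]
    have hpos : 0 < index := by omega
    set l := skip.toList.map (fun c => ((c.toNat : Int))) with hl
    set al : Int → Bool := fun v => !(l.contains v) with hal
    set dic := skip.toList.foldl (fun d i => d.insert ((i.toNat : Int)) 1)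
      (PySem.Dict.empty : PySem.Dict Int Int) with hdic
    have hmem : ∀ v, pvTruthy (dic.get? v) = !(al v) := by
      intro v
      have hfold : dic = l.foldl (fun d i => d.insert i 1) PySem.Dict.empty := by
        rw [hdic, hl, List.foldl_map]
      rw [hfold, truthy_foldl_insert, hal]
      simp [pvTruthy]
    have hset : ∀ v, (!(PySem.Set.contains (PySem.Set.ofList l) v)) = al v := by
      intro v
      rw [hal]
      simp [PySem.Set.contains_eq_listContains]
    -- the two filtered lists of the B port are pvQ's
    have hcycle : (PySem.List.pyRange 97 123 1).filter
        (fun c => !(PySem.Set.contains (PySem.Set.ofList l) c)) = pvQ al 97 := by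
      unfold pvQ; exact List.filter_congr (fun x _ => hset x)
    set k : Nat := index.toNat - 1 with hk
    have hidx : index.toNat = k + 1 := by omega
    have hidxcast : index = ((k + 1 : Nat) : Int) := by omega
    rw [hidx]
    congr 1
    apply List.map_congr_left
    intro c hc
    have hcode := dom_char_code (hdoms c hc)
    set code : Int := ((c.toNat : Int)) with hcode'
    set w0 : Int := if 122 < code then code - 26 else code with hw0
    have hw09 : 9 ≤ w0 := by rw [hw0]; split <;> omega
    have hw0122 : w0 ≤ 122 := by rw [hw0]; split <;> omega
    have hpre' : (PySem.List.pyRange (w0 + 1) 123 1).filter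
        (fun c => !(PySem.Set.contains (PySem.Set.ofList l) c)) = pvQ al (w0 + 1) := by
      unfold pvQ; exact List.filter_congr (fun x _ => hset x)
    rw [hcycle, hpre']
    -- A's loop from the raw code is the loop from the wrapped code w0
    have hloopw : pvLoopA dic (k + 1) code = pvLoopA dic (k + 1) w0 := by
      rw [hw0]
      by_cases h122 : 122 < code
      · rw [if_pos h122]; exact loopA_wrap dic k code (by omega) (by omega)
      · rw [if_neg h122]
    -- the per-character hypothesis of the closed form, from Pre_
    have hyp : k + 1 ≤ (pvQ al (w0 + 1)).length ∨ pvQ al 97 ≠ [] := by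
      rcases hpre with h | h | h
      · omega
      · right
        obtain ⟨n, hn1, hn2⟩ := h
        intro hnil
        have : n ∈ pvQ al 97 := by
          unfold pvQ
          rw [List.mem_filter]
          exact ⟨hn1, by rw [hal]; simpa [hl] using hn2⟩
        rw [hnil] at this
        exact absurd this (by simp)
      · left
        have hc2 := h c hc
        rw [← hcode', ← hw0, ← hl, ← hal] at hc2
        have hc3 : index ≤ ((pvQ al (w0 + 1)).length : Int) := hc2
        omega
    rw [hloopw, loop_closed dic al hmem k w0 hw09 hw0122 hyp]
    by_cases hbr : k + 1 ≤ (pvQ al (w0 + 1)).length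
    · rw [if_pos hbr, if_pos (by rw [hidxcast]; exact_mod_cast hbr)]
      have h1 : index - 1 = ((k : Nat) : Int) := by omega
      rw [h1, PySem.List.pyGet?_natCast]
      have hk' : k < (pvQ al (w0 + 1)).length := by omega
      rw [List.getElem?_eq_getElem hk', Option.getD_some, List.getD_eq_getElem _ _ hk']
    · rw [if_neg hbr, if_neg (by rw [hidxcast]; intro hcon; exact hbr (by exact_mod_cast hcon))]
      have hClen : 0 < (pvQ al 97).length := by
        rcases hyp with h | h
        · omega
        · exact List.length_pos_iff.mpr h
      have h1 : index - 1 - ((pvQ al (w0 + 1)).length : Int)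
          = (((k - (pvQ al (w0 + 1)).length : Nat)) : Int) := by omega
      rw [h1, PySem.Int.mod_natCast]
      rw [PySem.List.pyGet?_natCast]
      have hm : (k - (pvQ al (w0 + 1)).length) % (pvQ al 97).length < (pvQ al 97).length :=
        Nat.mod_lt _ hClen
      rw [List.getElem?_eq_getElem hm, Option.getD_some, List.getD_eq_getElem _ _ hm]
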